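-- pv_equiv track=rewrite | github.com/altermetax/AutoWordle | autowordle/wordle_util.py | absurdle_step
-- ===== SOURCE A (Python) =====
-- def wordle_compare(guess, correct_word):
--     result = ["gray", "gray", "gray", "gray", "gray"]
--
--     # First check the greens
--     for i in range(len(correct_word)):
--         if correct_word[i] == guess[i]:
--             result[i] = "green"
--
--     # Then check the yellows
--     for i in range(len(correct_word)):
--         if result[i] != "green": # If this position was not guessed with a green
--             for j in range(len(guess)):
--                 if correct_word[i] == guess[j] and result[j] == "gray":
--                     result[j] = "yellow"
--                     break
--
--     return tuple(result)
--
-- def compare_color_arrays(a, b):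
--     # Amount of greens
--     agreen = a.count("green")
--     bgreen = b.count("green")
--     if agreen > bgreen:
--         return 1
--     elif agreen < bgreen:
--         return -1
--
--     # Amount of yellows
--     ayellow = a.count("yellow")
--     byellow = b.count("yellow")
--     if ayellow > byellow:
--         return 1
--     elif ayellow < byellow:
--         return -1
--
--     # Alphabetical order
--     for i in range(len(a)):
--         if a[i] == "green" and b[i] != "green":
--             return 1
--         elif a[i] != "green" and b[i] == "green":
--             return -1
--         elif a[i] == "yellow" and b[i] == "gray":
--             return 1
--         elif a[i] == "gray" and b[i] == "yellow":
--             return -1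
--
--     return 0
--
-- def wordle_groups(guess, current_dictionary):
--     # Group all remaining words based on what the outcome would be if they were the correct word
--     # and pick the largest group
--     groups = {}
--
--     for word in current_dictionary:
--         result = wordle_compare(guess, word)
--         if result in groups:
--             groups[result].append(word)
--         else:
--             groups[result] = [word]
--
--     return groups
--
-- def absurdle_step(guess, current_dictionary):
--     groups = wordle_groups(guess, current_dictionary)
--
--     # Calculate best answer. If two groups are equally large, pick based on the keys, with criteria as in compare_color_arrays
--     keys = list(groups.keys())
--     best_answer = keys[0]
--     for i in range(1, len(keys)):
--         key = keys[i]
--         if (len(groups[key]) > len(groups[best_answer]) or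
--                 (len(groups[key]) == len(groups[best_answer]) and compare_color_arrays(key, best_answer) < 0)):
--             best_answer = key
--
--     return (groups, best_answer)
-- ===== SOURCE B (Python) =====
-- def wordle_compare(guess, correct_word):
--     result = ["gray"] * 5
--     for i, cc in enumerate(correct_word):
--         if cc == guess[i]:
--             result[i] = "green"
--     remaining = {}
--     for i, cc in enumerate(correct_word):
--         if result[i] != "green":
--             remaining[cc] = remaining.get(cc, 0) + 1
--     for j, gch in enumerate(guess):
--         if result[j] == "gray" and remaining.get(gch, 0) > 0:
--             result[j] = "yellow"
--             remaining[gch] -= 1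
--     return tuple(result)
--
-- _ORDER = {"gray": 0, "yellow": 1, "green": 2}
--
-- def absurdle_step(guess, current_dictionary):
--     groups = {}
--     for word in current_dictionary:
--         groups.setdefault(wordle_compare(guess, word), []).append(word)
--     best_answer = min(groups, key=lambda k: (-len(groups[k]),
--                                              k.count("green"),
--                                              k.count("yellow"),
--                                              tuple(_ORDER[c] for c in k)))
--     return (groups, best_answer)
-- ===== Notes on version B (the rewrite author's own statement) =====
-- stated objective: alternative
-- what changed: wordle_compare marks greens, builds a count of unmatched correct letters, and assigns yellows in one left-to-right pass over the guess instead of A's nested first-gray search per correct letter; grouping uses setdefault, and the best group is chosen by min over a numeric key tuple (-size, greens, yellows, per-position ranks) instead of A's hand-written three-stage comparator loop.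
import Mathlib
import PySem

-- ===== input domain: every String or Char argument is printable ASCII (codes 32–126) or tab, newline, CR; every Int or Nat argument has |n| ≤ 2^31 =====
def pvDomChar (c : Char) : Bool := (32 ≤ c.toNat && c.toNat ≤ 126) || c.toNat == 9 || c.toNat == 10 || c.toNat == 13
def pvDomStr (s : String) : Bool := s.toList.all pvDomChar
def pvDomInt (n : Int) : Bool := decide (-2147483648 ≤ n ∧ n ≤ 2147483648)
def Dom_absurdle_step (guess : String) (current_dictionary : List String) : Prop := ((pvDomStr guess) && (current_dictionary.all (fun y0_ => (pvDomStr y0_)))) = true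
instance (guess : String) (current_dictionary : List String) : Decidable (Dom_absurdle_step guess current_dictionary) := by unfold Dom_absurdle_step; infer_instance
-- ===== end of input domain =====

-- B replaces A's nested per-letter first-gray search for yellows by a single counter pass
-- over the guess positions, and A's hand-written three-stage comparator loop by an argmin
-- over a numeric key tuple (objective: alternative, same asymptotic cost).

-- ===== PORT A =====
def pvMarkFirstA (cc : Char) (r : List String) (pairs : List (Char × Nat)) : List String :=
  match pairs with
  | [] => r
  | (gc, j) :: rest =>
    if cc = gc ∧ r.getD j "" = "gray" then r.set j "yellow" else pvMarkFirstA cc r rest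

def pvWordleCompareA (guess correct : String) : List String :=
  let gl := guess.toList
  let cl := correct.toList
  let r0 : List String := ["gray", "gray", "gray", "gray", "gray"]
  let r1 := (List.range cl.length).foldl
    (fun r i => if cl.getD i ' ' = gl.getD i ' ' then r.set i "green" else r) r0
  (List.range cl.length).foldl
    (fun r i => if r.getD i "" ≠ "green" then pvMarkFirstA (cl.getD i ' ') r gl.zipIdx else r) r1

def pvPosLoopA : List String → List String → Int
  | a :: as, b :: bs =>
    if a = "green" ∧ b ≠ "green" then 1
    else if a ≠ "green" ∧ b = "green" then -1
    else if a = "yellow" ∧ b = "gray" then 1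
    else if a = "gray" ∧ b = "yellow" then -1
    else pvPosLoopA as bs
  | _, _ => 0

def pvCompareColorsA (a b : List String) : Int :=
  let agreen := a.count "green"
  let bgreen := b.count "green"
  if agreen > bgreen then 1
  else if agreen < bgreen then -1
  else
    let ayellow := a.count "yellow"
    let byellow := b.count "yellow"
    if ayellow > byellow then 1
    else if ayellow < byellow then -1
    else pvPosLoopA a b

def pvWordleGroupsA (guess : String) (dict : List String) :
    PySem.Dict (List String) (List String) :=
  dict.foldl (fun d w =>
    let r := pvWordleCompareA guess w
    match d.get? r with
    | some l => d.insert r (l ++ [w])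
    | none => d.insert r [w]) PySem.Dict.empty

def absurdle_step (guess : String) (current_dictionary : List String) :
    (List (List String × List String)) × List String :=
  let groups := pvWordleGroupsA guess current_dictionary
  let keys := groups.keys
  let best := (PySem.List.pyRange 1 (PySem.List.len keys)).foldl
    (fun best i =>
      let key := PySem.List.pyGetD keys i []
      if (groups.getD key []).length > (groups.getD best []).length ∨
         ((groups.getD key []).length = (groups.getD best []).length ∧
           pvCompareColorsA key best < 0)
      then key else best)
    (PySem.List.pyGetD keys 0 [])
  (groups.items, best)

-- ===== PORT B =====
def pvWordleCompareB (guess correct : String) : List String :=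
  let gl := guess.toList
  let cl := correct.toList
  let r1 := cl.zipIdx.foldl
    (fun r p => if p.1 = gl.getD p.2 ' ' then r.set p.2 "green" else r)
    (List.replicate 5 "gray")
  let remaining := cl.zipIdx.foldl
    (fun d p => if r1.getD p.2 "" ≠ "green" then d.insert p.1 (d.getD p.1 0 + 1) else d)
    (PySem.Dict.empty : PySem.Dict Char Int)
  (gl.zipIdx.foldl
    (fun (s : List String × PySem.Dict Char Int) p =>
      if s.1.getD p.2 "" = "gray" ∧ s.2.getD p.1 0 > 0 then
        (s.1.set p.2 "yellow", s.2.insert p.1 (s.2.getD p.1 0 - 1))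
      else s)
    (r1, remaining)).1

def pvOrderB : PySem.Dict String Int :=
  PySem.Dict.ofList [("gray", 0), ("yellow", 1), ("green", 2)]

def pvLexLtB : List Int → List Int → Bool
  | _, [] => false
  | [], _ :: _ => true
  | x :: xs, y :: ys => x < y || (x == y && pvLexLtB xs ys)

def pvKeyB (groups : PySem.Dict (List String) (List String)) (k : List String) :
    Int × Int × Int × List Int :=
  (-((groups.getD k []).length : Int), (k.count "green" : Int), (k.count "yellow" : Int),
    k.map (fun c => pvOrderB.getD c 0))

def pvKeyLtB (a b : Int × Int × Int × List Int) : Bool :=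
  a.1 < b.1 || (a.1 == b.1 && (a.2.1 < b.2.1 || (a.2.1 == b.2.1 &&
    (a.2.2.1 < b.2.2.1 || (a.2.2.1 == b.2.2.1 && pvLexLtB a.2.2.2 b.2.2.2)))))

def absurdle_step_alt (guess : String) (current_dictionary : List String) :
    (List (List String × List String)) × List String :=
  let groups := current_dictionary.foldl
    (fun d w => d.modify (pvWordleCompareB guess w) [] (· ++ [w])) PySem.Dict.empty
  let best := match groups.keys with
    | [] => []
    | k0 :: rest => rest.foldl (fun best k =>
        if pvKeyLtB (pvKeyB groups k) (pvKeyB groups best) then k else best) k0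
  (groups.items, best)


-- ===== PRECONDITION & SPEC =====
-- Pre_ is the crash-free Wordle domain of A's hard-coded 5-slot result array: a guess of at
-- most 5 letters, a nonempty dictionary, and words no longer than the guess; outside it A
-- raises IndexError on all inputs except some guesses longer than 5 letters, where A's
-- return depends on its mutable scan state and B (which never reads past slot 5) raises.
def Pre_absurdle_step (guess : String) (current_dictionary : List String) : Prop :=
  guess.toList.length ≤ 5 ∧ current_dictionary ≠ [] ∧
    ∀ w ∈ current_dictionary, w.toList.length ≤ guess.toList.length
instance (guess : String) (current_dictionary : List String) : Decidable (Pre_absurdle_step guess current_dictionary) := by unfold Pre_absurdle_step; infer_instance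

def pvWitness_absurdle_step : String × List String := ("crane", ["slate", "crane"])

def Spec_absurdle_step (guess : String) (current_dictionary : List String) (out : (List (List String × List String)) × List String) : Prop := out = absurdle_step_alt guess current_dictionary
instance (guess : String) (current_dictionary : List String) (out : (List (List String × List String)) × List String) : Decidable (Spec_absurdle_step guess current_dictionary out) := by unfold Spec_absurdle_step; infer_instance

-- ===== CLAIM (what is proved, stated in full; the proofs are below) =====
def Claim_equal_absurdle_step : Prop := ∀ (guess : String) (current_dictionary : List String), Dom_absurdle_step guess current_dictionary → Pre_absurdle_step guess current_dictionary → Spec_absurdle_step guess current_dictionary (absurdle_step guess current_dictionary)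

-- ===== LEMMAS AND PROOFS =====

-- proof-side notions
def pvG (gl cl : List Char) (j : Nat) : Bool :=
  decide (j < cl.length) && (cl.getD j ' ' == gl.getD j ' ')
def pvRank (gl cl : List Char) (j : Nat) : Nat :=
  (List.range j).countP (fun j' => gl.getD j' ' ' == gl.getD j ' ' && !pvG gl cl j')
def pvCnt (gl cl : List Char) (k : Nat) (x : Char) : Nat :=
  (List.range k).countP (fun i => cl.getD i ' ' == x && !pvG gl cl i)
def pvColor (gl cl : List Char) (m : Char → Nat) (j : Nat) : String :=
  if pvG gl cl j then "green"
  else if j < gl.length ∧ pvRank gl cl j < m (gl.getD j ' ') then "yellow" else "gray"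
def pvBump (m : Char → Nat) (x : Char) : Char → Nat := fun y => if y = x then m x + 1 else m y

lemma pv_countP_lt_of_lt {P : Nat → Bool} {j t : Nat} (hj : j < t) (h : P j = true) :
    (List.range j).countP P < (List.range t).countP P := by
  have h1 : (List.range (j+1)).countP P ≤ (List.range t).countP P :=
    (List.range_sublist.2 hj).countP_le
  have h2 : (List.range (j+1)).countP P = (List.range j).countP P + 1 := by
    simp [List.range_succ, List.countP_append, h]
  omega

lemma pv_exists_countP_range (P : Nat → Bool) (K : Nat) :
    ∀ t, K < (List.range t).countP P → ∃ j, j < t ∧ P j = true ∧ (List.range j).countP P = K := by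
  intro t
  induction t with
  | zero => simp
  | succ t ih =>
    intro h
    by_cases hK : K < (List.range t).countP P
    · obtain ⟨j, hj, hP, hc⟩ := ih hK
      exact ⟨j, Nat.lt_succ_of_lt hj, hP, hc⟩
    · have hs : (List.range (t+1)).countP P = (List.range t).countP P + (if P t then 1 else 0) := by
        simp [List.range_succ, List.countP_append, List.countP_cons]
      by_cases hPt : P t = true
      · refine ⟨t, Nat.lt_succ_self t, hPt, ?_⟩
        simp [hPt] at hs
        omega
      · simp [hPt] at hs; omega

lemma pv_getD_map_range {α : Type} (f : Nat → α) (d : α) {t n : Nat} (h : t < n) :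
    ((List.range n).map f).getD t d = f t := by
  rw [List.getD_eq_getElem?_getD, List.getElem?_map]
  simp [List.getElem?_range h]

lemma pv_color_congr (gl cl : List Char) {m1 m2 : Char → Nat} (h : ∀ y, m1 y = m2 y) (j : Nat) :
    pvColor gl cl m1 j = pvColor gl cl m2 j := by
  unfold pvColor
  rw [h]

lemma pv_greens_fold (gl cl : List Char) (n : Nat) (hn : n ≤ 5) :
    (List.range n).foldl
      (fun r i => if cl.getD i ' ' = gl.getD i ' ' then r.set i "green" else r)
      ["gray", "gray", "gray", "gray", "gray"]
      = (List.range 5).map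
          (fun j => if j < n ∧ cl.getD j ' ' = gl.getD j ' ' then "green" else "gray") := by
  induction n with
  | zero =>
    norm_num [List.range_succ]
  | succ n ih =>
    rw [show List.range (n+1) = List.range n ++ [n] from List.range_succ,
      List.foldl_append, ih (by omega)]
    simp only [List.foldl_cons, List.foldl_nil]
    by_cases hG : cl.getD n ' ' = gl.getD n ' '
    · rw [if_pos hG]
      apply List.ext_getElem
      · simp
      · intro j h1 h2
        simp only [List.getElem_set, List.getElem_map, List.getElem_range]
        simp only [List.length_set, List.length_map, List.length_range] at h1 h2
        by_cases hj : n = j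
        · subst hj
          rw [if_pos rfl, if_pos ⟨by omega, hG⟩]
        · have : (j < n ∧ cl.getD j ' ' = gl.getD j ' ') ↔ (j < n + 1 ∧ cl.getD j ' ' = gl.getD j ' ') := by
            constructor
            · rintro ⟨h, hg⟩; exact ⟨by omega, hg⟩
            · rintro ⟨h, hg⟩; exact ⟨by omega, hg⟩
          simp only [hj, if_false]
          exact if_congr this rfl rfl
    · rw [if_neg hG]
      apply List.map_congr_left
      intro j hj
      by_cases hjn : j = n
      · subst hjn
        have h1 : ¬ (j < j ∧ cl.getD j ' ' = gl.getD j ' ') := by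
          rintro ⟨h, -⟩; omega
        have h2 : ¬ (j < j + 1 ∧ cl.getD j ' ' = gl.getD j ' ') := by
          rintro ⟨-, h⟩; exact hG h
        rw [if_neg h1, if_neg h2]
      · have : (j < n ∧ cl.getD j ' ' = gl.getD j ' ') ↔ (j < n + 1 ∧ cl.getD j ' ' = gl.getD j ' ') := by
          constructor
          · rintro ⟨h, hg⟩; exact ⟨by omega, hg⟩
          · rintro ⟨h, hg⟩; exact ⟨Nat.lt_of_le_of_ne (by omega) hjn, hg⟩
        exact if_congr this rfl rfl

lemma pv_color_bump_of_ne (gl cl : List Char) (m : Char → Nat) (x : Char) (j : Nat)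
    (h : j < gl.length → gl.getD j ' ' = x → pvG gl cl j = false → pvRank gl cl j ≠ m x) :
    pvColor gl cl m j = pvColor gl cl (pvBump m x) j := by
  simp only [pvColor, pvBump]
  by_cases hG : pvG gl cl j
  · rw [if_pos hG, if_pos hG]
  · rw [if_neg hG, if_neg hG]
    by_cases hjl : j < gl.length
    · by_cases hx : gl.getD j ' ' = x
      · have hGf : pvG gl cl j = false := by simpa using hG
        have hne := h hjl hx hGf
        rw [hx]
        exact if_congr (by simp; omega) rfl rfl
      · exact if_congr (by rw [if_neg hx]) rfl rfl
    · rw [if_neg (by rintro ⟨hc, -⟩; exact hjl hc), if_neg (by rintro ⟨hc, -⟩; exact hjl hc)]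

lemma pv_markFirst_scan (gl cl : List Char) (hg5 : gl.length ≤ 5) (x : Char) :
    ∀ (d : List Char) (m : Char → Nat) (t : Nat), gl.drop t = d →
    (∀ j, j < t → gl.getD j ' ' = x → pvG gl cl j = false → pvRank gl cl j < m x) →
    pvMarkFirstA x ((List.range 5).map (pvColor gl cl m)) (d.zipIdx t)
      = (List.range 5).map (pvColor gl cl (pvBump m x)) := by
  intro d
  induction d with
  | nil =>
    intro m t hdrop hpre
    have htL : gl.length ≤ t := by
      by_contra hlt
      have : gl.drop t ≠ [] := by
        apply List.ne_nil_of_length_pos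
        rw [List.length_drop]
        omega
      exact this hdrop
    simp only [List.zipIdx_nil, pvMarkFirstA]
    apply List.map_congr_left
    intro j hj
    rw [List.mem_range] at hj
    apply pv_color_bump_of_ne
    intro hjl hx hGf
    have := hpre j (by omega) hx hGf
    omega
  | cons gc rest ih =>
    intro m t hdrop hpre
    have htlt : t < gl.length := by
      by_contra hge
      have : gl.drop t = [] := by
        apply List.drop_eq_nil_of_le
        omega
      rw [this] at hdrop
      exact absurd hdrop.symm (List.cons_ne_nil _ _)
    have ht5 : t < 5 := by omega
    have hcons : gl.drop t = gl[t]'(by omega) :: gl.drop (t + 1) :=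
      List.drop_eq_getElem_cons (by omega)
    rw [hdrop] at hcons
    have hgc : gc = gl[t]'(by omega) := (List.cons.injEq _ _ _ _).mp hcons |>.1
    have hrest : rest = gl.drop (t + 1) := (List.cons.injEq _ _ _ _).mp hcons |>.2
    have hgetD : gl.getD t ' ' = gc := by
      rw [hgc, List.getD_eq_getElem]
    rw [List.zipIdx_cons]
    simp only [pvMarkFirstA]
    have hrt : ((List.range 5).map (pvColor gl cl m)).getD t "" = pvColor gl cl m t :=
      pv_getD_map_range _ _ ht5
    by_cases hxgc : x = gc
    · by_cases hG : pvG gl cl t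
      · rw [if_neg (by
          rw [hrt]
          unfold pvColor
          simp [hG])]
        apply ih m (t + 1) hrest.symm
        intro j hj hxj hGj
        rcases Nat.lt_succ_iff_lt_or_eq.mp hj with hlt | heq
        · exact hpre j hlt hxj hGj
        · subst heq
          rw [hGj] at hG
          exact absurd hG (by simp)
      · have hGf : pvG gl cl t = false := by simpa using hG
        by_cases hrk : pvRank gl cl t < m x
        · rw [if_neg (by
            rw [hrt]
            unfold pvColor
            rw [if_neg (by simp [hGf]),
              if_pos ⟨htlt, by rw [hgetD, ← hxgc]; exact hrk⟩]
            simp)]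
          apply ih m (t + 1) hrest.symm
          intro j hj hxj hGj
          rcases Nat.lt_succ_iff_lt_or_eq.mp hj with hlt | heq
          · exact hpre j hlt hxj hGj
          · subst heq; exact hrk
        · rw [if_pos ⟨hxgc, by
            rw [hrt]
            unfold pvColor
            rw [if_neg (by simp [hGf]), if_neg (by
              rintro ⟨-, hr⟩
              rw [hgetD, ← hxgc] at hr
              exact hrk hr)]⟩]
          have hxt : gl.getD t ' ' = x := by rw [hgetD, ← hxgc]
          have hrank_le : pvRank gl cl t ≤ m x := by
            by_contra hgt
            rw [Nat.not_le] at hgt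
            unfold pvRank at hgt
            obtain ⟨j, hjt, hPj, hcnt⟩ :=
              pv_exists_countP_range (fun j' => gl.getD j' ' ' == gl.getD t ' ' && !pvG gl cl j') (m x) t hgt
            have hPj' := hPj
            rw [Bool.and_eq_true, beq_iff_eq] at hPj'
            have hxj : gl.getD j ' ' = x := by rw [hPj'.1, hxt]
            have hGj : pvG gl cl j = false := by
              have := hPj'.2
              simpa using this
            have := hpre j hjt hxj hGj
            unfold pvRank at this
            rw [show gl.getD j ' ' = gl.getD t ' ' from hPj'.1] at this
            omega
          have hrank_eq : pvRank gl cl t = m x := by omega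
          apply List.ext_getElem
          · simp
          · intro j h1 h2
            simp only [List.length_set, List.length_map, List.length_range] at h1 h2
            simp only [List.getElem_set, List.getElem_map, List.getElem_range]
            by_cases hjt : t = j
            · subst hjt
              rw [if_pos rfl]
              unfold pvColor pvBump
              rw [if_neg (by simp [hGf]), hxt, if_pos ⟨htlt, by rw [if_pos rfl]; omega⟩]
            · rw [if_neg hjt]
              apply pv_color_bump_of_ne
              intro hjl hxj hGjf
              rcases Nat.lt_or_ge j t with hlt | hge
              · have := hpre j hlt hxj hGjf
                omega
              · have hjgt : t < j := by omega
                have hP : (fun j' => gl.getD j' ' ' == gl.getD t ' ' && !pvG gl cl j') t = true := by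
                  simp [hGf]
                have hmono : (List.range t).countP (fun j' => gl.getD j' ' ' == gl.getD t ' ' && !pvG gl cl j')
                    < (List.range j).countP (fun j' => gl.getD j' ' ' == gl.getD t ' ' && !pvG gl cl j') :=
                  pv_countP_lt_of_lt hjgt hP
                have hrj : pvRank gl cl t < pvRank gl cl j := by
                  unfold pvRank
                  rw [show gl.getD j ' ' = gl.getD t ' ' by rw [hxj, hxt]]
                  exact hmono
                omega
    · rw [if_neg (by
        intro hcond
        exact hxgc hcond.1)]
      apply ih m (t + 1) hrest.symm
      intro j hj hxj hGj
      rcases Nat.lt_succ_iff_lt_or_eq.mp hj with hlt | heq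
      · exact hpre j hlt hxj hGj
      · subst heq
        rw [hxj] at hgetD
        exact absurd hgetD hxgc

lemma pv_cnt_succ (gl cl : List Char) (n : Nat) (y : Char) :
    pvCnt gl cl (n + 1) y
      = pvCnt gl cl n y + (if cl.getD n ' ' == y && !pvG gl cl n then 1 else 0) := by
  unfold pvCnt
  rw [List.range_succ, List.countP_append]
  simp [List.countP_cons]

lemma pv_phase2_fold (gl cl : List Char) (hg5 : gl.length ≤ 5) (hc5 : cl.length ≤ 5)
    (n : Nat) (hn : n ≤ cl.length) :
    (List.range n).foldl
      (fun r i => if r.getD i "" ≠ "green" then pvMarkFirstA (cl.getD i ' ') r gl.zipIdx else r)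
      ((List.range 5).map (pvColor gl cl (fun _ => 0)))
      = (List.range 5).map (pvColor gl cl (pvCnt gl cl n)) := by
  induction n with
  | zero =>
    apply List.map_congr_left
    intro j _
    apply pv_color_congr
    intro y
    simp [pvCnt]
  | succ n ih =>
    rw [show List.range (n+1) = List.range n ++ [n] from List.range_succ,
      List.foldl_append, ih (by omega)]
    simp only [List.foldl_cons, List.foldl_nil]
    have hn5 : n < 5 := by omega
    have hrn : ((List.range 5).map (pvColor gl cl (pvCnt gl cl n))).getD n ""
        = pvColor gl cl (pvCnt gl cl n) n := pv_getD_map_range _ _ hn5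
    by_cases hG : pvG gl cl n
    · rw [if_neg (by
        rw [hrn]
        unfold pvColor
        simp [hG])]
      apply List.map_congr_left
      intro j _
      apply pv_color_congr
      intro y
      rw [pv_cnt_succ]
      simp [hG]
    · have hGf : pvG gl cl n = false := by simpa using hG
      rw [if_pos (by
        rw [hrn]
        unfold pvColor
        rw [if_neg (by simp [hGf])]
        split <;> simp)]
      rw [pv_markFirst_scan gl cl hg5 (cl.getD n ' ') gl (pvCnt gl cl n) 0 (by simp)
        (by intro j hj; omega)]
      apply List.map_congr_left
      intro j _
      apply pv_color_congr
      intro y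
      simp only [pvBump]
      rw [pv_cnt_succ]
      by_cases hy : y = cl.getD n ' '
      · subst hy
        simp [hGf]
      · rw [if_neg hy]
        have hbe : (cl.getD n ' ' == y) = false := beq_eq_false_iff_ne.mpr (fun h => hy h.symm)
        rw [hbe]
        simp

lemma pv_wcA_eq (g c : String) (hg5 : g.toList.length ≤ 5) (hcg : c.toList.length ≤ g.toList.length) :
    pvWordleCompareA g c
      = (List.range 5).map (pvColor g.toList c.toList (pvCnt g.toList c.toList c.toList.length)) := by
  unfold pvWordleCompareA
  dsimp only
  rw [pv_greens_fold g.toList c.toList c.toList.length (by omega)]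
  have hinit : (List.range 5).map
      (fun j => if j < c.toList.length ∧ c.toList.getD j ' ' = g.toList.getD j ' ' then "green" else "gray")
      = (List.range 5).map (pvColor g.toList c.toList (fun _ => 0)) := by
    apply List.map_congr_left
    intro j hj
    have hiff : (j < c.toList.length ∧ c.toList.getD j ' ' = g.toList.getD j ' ')
        ↔ pvG g.toList c.toList j = true := by
      unfold pvG
      rw [Bool.and_eq_true, decide_eq_true_iff, beq_iff_eq]
    unfold pvColor
    by_cases hpg : pvG g.toList c.toList j = true
    · rw [if_pos hpg, if_pos (hiff.mpr hpg)]
    · rw [if_neg hpg, if_neg (fun hc => hpg (hiff.mp hc))]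
      rw [if_neg (by rintro ⟨-, h⟩; simp at h)]
  rw [hinit]
  exact pv_phase2_fold g.toList c.toList hg5 (by omega) c.toList.length (by omega)

lemma pv_zipIdx_eq (l : List Char) :
    l.zipIdx = (List.range l.length).map (fun i => (l.getD i ' ', i)) := by
  apply List.ext_getElem
  · simp
  · intro i h1 h2
    simp [List.getElem_zipIdx]
    rw [List.getElem?_eq_getElem (show i < l.length by simpa using h1)]
    rfl

lemma pv_remainingB (gl cl : List Char) (hc5 : cl.length ≤ 5) (x : Char) :
    (cl.zipIdx.foldl
      (fun d p => if ((List.range 5).map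
          (fun j => if j < cl.length ∧ cl.getD j ' ' = gl.getD j ' ' then "green" else "gray")).getD p.2 "" ≠ "green"
        then d.insert p.1 (d.getD p.1 0 + 1) else d)
      (PySem.Dict.empty : PySem.Dict Char Int)).getD x 0
      = (pvCnt gl cl cl.length x : Int) := by
  rw [pv_zipIdx_eq cl, List.foldl_map]
  rw [PySem.List.foldl_ite_eq_foldl_filter
    (p := fun i => ((List.range 5).map
      (fun j => if j < cl.length ∧ cl.getD j ' ' = gl.getD j ' ' then "green" else "gray")).getD i "" ≠ "green")
    (f := fun (d : PySem.Dict Char Int) (i : Nat) => d.insert (cl.getD i ' ') (d.getD (cl.getD i ' ') 0 + 1))]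
  rw [show List.foldl (fun (d : PySem.Dict Char Int) (i : Nat) => d.insert (cl.getD i ' ') (d.getD (cl.getD i ' ') 0 + 1))
        PySem.Dict.empty
        ((List.range cl.length).filter
          (fun i => decide (((List.range 5).map
            (fun j => if j < cl.length ∧ cl.getD j ' ' = gl.getD j ' ' then "green" else "gray")).getD i "" ≠ "green")))
      = List.foldl (fun (d : PySem.Dict Char Int) (y : Char) => d.insert y (d.getD y 0 + 1))
        PySem.Dict.empty
        (((List.range cl.length).filter
          (fun i => decide (((List.range 5).map
            (fun j => if j < cl.length ∧ cl.getD j ' ' = gl.getD j ' ' then "green" else "gray")).getD i "" ≠ "green"))).map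
          (fun i => cl.getD i ' '))
      from (List.foldl_map (f := fun i => cl.getD i ' ')
        (g := fun (d : PySem.Dict Char Int) (y : Char) => d.insert y (d.getD y 0 + 1))).symm]
  rw [PySem.Dict.getD_foldl_insert_add_one, PySem.Dict.getD_empty]
  rw [List.count, List.countP_map, List.countP_filter]
  have hnat : ((List.range cl.length).countP
      (fun i => ((fun b => b == x) ∘ fun i => cl.getD i ' ') i &&
        decide (((List.range 5).map
          (fun j => if j < cl.length ∧ cl.getD j ' ' = gl.getD j ' ' then "green" else "gray")).getD i "" ≠ "green")))
      = pvCnt gl cl cl.length x := by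
    unfold pvCnt
    apply List.countP_congr
    intro i hi
    rw [List.mem_range] at hi
    have hr : ((List.range 5).map
        (fun j => if j < cl.length ∧ cl.getD j ' ' = gl.getD j ' ' then "green" else "gray")).getD i ""
        = (if i < cl.length ∧ cl.getD i ' ' = gl.getD i ' ' then "green" else "gray") :=
      pv_getD_map_range _ _ (by omega)
    simp only [Function.comp_apply, hr]
    by_cases hG : pvG gl cl i
    · have : (i < cl.length ∧ cl.getD i ' ' = gl.getD i ' ') := by
        unfold pvG at hG
        rw [Bool.and_eq_true, decide_eq_true_iff, beq_iff_eq] at hG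
        exact hG
      rw [if_pos this]
      simp [hG]
    · have hGf : pvG gl cl i = false := by simpa using hG
      have hne : ¬ (i < cl.length ∧ cl.getD i ' ' = gl.getD i ' ') := by
        intro hcon
        unfold pvG at hGf
        rw [Bool.and_eq_false_iff] at hGf
        rcases hGf with h | h
        · rw [decide_eq_false_iff_not] at h; exact h hcon.1
        · rw [beq_eq_false_iff_ne] at h; exact h hcon.2
      rw [if_neg hne]
      simp [hGf]
  rw [hnat]
  omega

def pvA (gl cl : List Char) (k : Nat) (x : Char) : Nat :=
  (List.range k).countP (fun j => gl.getD j ' ' == x && !pvG gl cl j)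

lemma pv_pvA_succ (gl cl : List Char) (k : Nat) (x : Char) :
    pvA gl cl (k + 1) x
      = pvA gl cl k x + (if gl.getD k ' ' == x && !pvG gl cl k then 1 else 0) := by
  unfold pvA
  rw [List.range_succ, List.countP_append]
  simp [List.countP_cons]

lemma pv_rank_eq_pvA (gl cl : List Char) (k : Nat) :
    pvRank gl cl k = pvA gl cl k (gl.getD k ' ') := rfl

def pvColorK (gl cl : List Char) (k j : Nat) : String :=
  if pvG gl cl j then "green"
  else if j < k ∧ j < gl.length ∧ pvRank gl cl j < pvCnt gl cl cl.length (gl.getD j ' ')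
  then "yellow" else "gray"

lemma pv_colorK_final (gl cl : List Char) {k : Nat} (hk : gl.length ≤ k) (j : Nat) :
    pvColorK gl cl k j = pvColor gl cl (pvCnt gl cl cl.length) j := by
  unfold pvColorK pvColor
  by_cases hG : pvG gl cl j
  · rw [if_pos hG, if_pos hG]
  · rw [if_neg hG, if_neg hG]
    exact if_congr ⟨fun h => ⟨h.2.1, h.2.2⟩, fun h => ⟨by omega, h.1, h.2⟩⟩ rfl rfl

lemma pv_colorK_succ_ne (gl cl : List Char) {k j : Nat} (hne : k ≠ j) :
    pvColorK gl cl k j = pvColorK gl cl (k + 1) j := by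
  unfold pvColorK
  by_cases hG : pvG gl cl j
  · rw [if_pos hG, if_pos hG]
  · rw [if_neg hG, if_neg hG]
    exact if_congr ⟨fun h => ⟨by omega, h.2⟩, fun h => ⟨by omega, h.2⟩⟩ rfl rfl

lemma pv_B3 (gl cl : List Char) (hg5 : gl.length ≤ 5) :
    ∀ (d : List (Char × Nat)) (k : Nat) (rem : PySem.Dict Char Int),
    gl.zipIdx.drop k = d → k ≤ gl.length →
    (∀ x, rem.getD x 0 = (pvCnt gl cl cl.length x : Int)
      - min (pvCnt gl cl cl.length x) (pvA gl cl k x)) →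
    (d.foldl (fun (s : List String × PySem.Dict Char Int) p =>
        if s.1.getD p.2 "" = "gray" ∧ s.2.getD p.1 0 > 0 then
          (s.1.set p.2 "yellow", s.2.insert p.1 (s.2.getD p.1 0 - 1))
        else s)
      ((List.range 5).map (pvColorK gl cl k), rem)).1
    = (List.range 5).map (pvColor gl cl (pvCnt gl cl cl.length)) := by
  intro d
  induction d with
  | nil =>
    intro k rem hdrop hk hinv
    simp only [List.foldl_nil]
    have hkL : gl.length ≤ k := by
      by_contra hlt
      have : gl.zipIdx.drop k ≠ [] := by
        apply List.ne_nil_of_length_pos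
        rw [List.length_drop, List.length_zipIdx]
        omega
      exact this hdrop
    apply List.map_congr_left
    intro j _
    exact pv_colorK_final gl cl hkL j
  | cons p rest ih =>
    intro k rem hdrop hk hinv
    have hklt : k < gl.length := by
      by_contra hge
      have : gl.zipIdx.drop k = [] := by
        apply List.drop_eq_nil_of_le
        rw [List.length_zipIdx]
        omega
      rw [this] at hdrop
      exact absurd hdrop.symm (List.cons_ne_nil _ _)
    have hk5 : k < 5 := by omega
    have hcons : gl.zipIdx.drop k = gl.zipIdx[k]'(by rw [List.length_zipIdx]; omega) :: gl.zipIdx.drop (k + 1) :=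
      List.drop_eq_getElem_cons (by rw [List.length_zipIdx]; omega)
    rw [hdrop] at hcons
    have hp : p = (gl[k]'(by omega), k) := by
      have h1 := ((List.cons.injEq _ _ _ _).mp hcons).1
      rw [List.getElem_zipIdx] at h1
      simpa using h1
    have hrest : rest = gl.zipIdx.drop (k + 1) := ((List.cons.injEq _ _ _ _).mp hcons).2
    have hgetD : gl.getD k ' ' = gl[k]'(by omega) := List.getD_eq_getElem gl ' ' (by omega)
    have hrk : ((List.range 5).map (pvColorK gl cl k)).getD k "" = pvColorK gl cl k k :=
      pv_getD_map_range _ _ hk5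
    simp only [List.foldl_cons]
    by_cases hG : pvG gl cl k
    · rw [hp]
      rw [if_neg (by
        rintro ⟨hcontra, -⟩
        rw [hrk] at hcontra
        unfold pvColorK at hcontra
        rw [if_pos hG] at hcontra
        exact absurd hcontra (by decide))]
      rw [show (List.range 5).map (pvColorK gl cl k) = (List.range 5).map (pvColorK gl cl (k + 1)) from
        List.map_congr_left (fun j hj => by
          by_cases hjk : k = j
          · subst hjk
            unfold pvColorK
            rw [if_pos hG, if_pos hG]
          · exact pv_colorK_succ_ne gl cl hjk)]
      apply ih (k + 1) rem hrest.symm (by omega)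
      intro x
      rw [hinv x]
      have : pvA gl cl (k + 1) x = pvA gl cl k x := by
        rw [pv_pvA_succ]
        simp [hG]
      rw [this]
    · have hGf : pvG gl cl k = false := by simpa using hG
      have hcolK : pvColorK gl cl k k = "gray" := by
        unfold pvColorK
        rw [if_neg (by simp [hGf]), if_neg (by rintro ⟨h, -⟩; omega)]
      by_cases hA : pvA gl cl k (gl.getD k ' ') < pvCnt gl cl cl.length (gl.getD k ' ')
      · -- yellow
        rw [hp]
        rw [if_pos ⟨by rw [hrk, hcolK], by
          show rem.getD (gl[k]'(by omega)) 0 > 0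
          rw [← hgetD, hinv (gl.getD k ' ')]
          omega⟩]
        have hsetK : ((List.range 5).map (pvColorK gl cl k)).set k "yellow"
            = (List.range 5).map (pvColorK gl cl (k + 1)) := by
          apply List.ext_getElem
          · simp
          · intro j h1 h2
            simp only [List.length_set, List.length_map, List.length_range] at h1 h2
            simp only [List.getElem_set, List.getElem_map, List.getElem_range]
            by_cases hjk : k = j
            · subst hjk
              rw [if_pos rfl]
              unfold pvColorK
              rw [if_neg (by simp [hGf]),
                if_pos ⟨by omega, by omega, by rw [pv_rank_eq_pvA]; exact hA⟩]
            · rw [if_neg hjk]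
              exact pv_colorK_succ_ne gl cl hjk
        rw [hsetK]
        apply ih (k + 1) _ hrest.symm (by omega)
        intro x
        rw [PySem.Dict.getD_insert]
        by_cases hx : x = gl[k]'(by omega)
        · rw [if_pos hx, ← hgetD, hinv (gl.getD k ' ')]
          subst hx
          rw [pv_pvA_succ]
          rw [show (gl.getD k ' ' == gl[k]'(by omega)) = true from beq_iff_eq.mpr hgetD]
          rw [hGf]
          rw [← hgetD]
          simp only [Bool.not_false, Bool.and_true, if_pos]
          omega
        · rw [if_neg hx, hinv x]
          have : pvA gl cl (k + 1) x = pvA gl cl k x := by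
            rw [pv_pvA_succ]
            rw [show (gl.getD k ' ' == x) = false from
              beq_eq_false_iff_ne.mpr (by rw [hgetD]; exact fun h => hx h.symm)]
            simp
          rw [this]
      · -- gray
        rw [hp]
        rw [if_neg (by
          rintro ⟨-, hpos⟩
          revert hpos
          show ¬ rem.getD (gl[k]'(by omega)) 0 > 0
          rw [← hgetD, hinv (gl.getD k ' ')]
          omega)]
        rw [show (List.range 5).map (pvColorK gl cl k) = (List.range 5).map (pvColorK gl cl (k + 1)) from
          List.map_congr_left (fun j hj => by
            by_cases hjk : k = j
            · subst hjk
              rw [hcolK]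
              unfold pvColorK
              rw [if_neg (show ¬ pvG gl cl k = true from hG),
                if_neg (show ¬(k < k + 1 ∧ k < gl.length ∧
                    pvRank gl cl k < pvCnt gl cl cl.length (gl.getD k ' ')) from by
                  rintro ⟨-, -, hr⟩
                  rw [pv_rank_eq_pvA] at hr
                  exact hA hr)]
            · exact pv_colorK_succ_ne gl cl hjk)]
        apply ih (k + 1) rem hrest.symm (by omega)
        intro x
        rw [hinv x]
        by_cases hx : x = gl.getD k ' '
        · subst hx
          rw [pv_pvA_succ]
          simp only [beq_self_eq_true, hGf, Bool.not_false, Bool.and_true, if_pos]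
          omega
        · have : pvA gl cl (k + 1) x = pvA gl cl k x := by
            rw [pv_pvA_succ]
            rw [show (gl.getD k ' ' == x) = false from
              beq_eq_false_iff_ne.mpr (fun h => hx h.symm)]
            simp
          rw [this]

lemma pv_wcB_eq (g c : String) (hg5 : g.toList.length ≤ 5) (hcg : c.toList.length ≤ g.toList.length) :
    pvWordleCompareB g c
      = (List.range 5).map (pvColor g.toList c.toList (pvCnt g.toList c.toList c.toList.length)) := by
  unfold pvWordleCompareB
  dsimp only
  rw [show (List.replicate 5 "gray" : List String) = ["gray","gray","gray","gray","gray"] from rfl]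
  rw [show c.toList.zipIdx.foldl
        (fun (r : List String) p => if p.1 = g.toList.getD p.2 ' ' then r.set p.2 "green" else r)
        ["gray","gray","gray","gray","gray"]
      = (List.range c.toList.length).foldl
        (fun (r : List String) i => if c.toList.getD i ' ' = g.toList.getD i ' ' then r.set i "green" else r)
        ["gray","gray","gray","gray","gray"] from by
    rw [pv_zipIdx_eq c.toList, List.foldl_map]]
  rw [pv_greens_fold g.toList c.toList c.toList.length (by omega)]
  have hmap : (List.range 5).map
        (fun j => if j < c.toList.length ∧ c.toList.getD j ' ' = g.toList.getD j ' ' then "green" else "gray")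
      = (List.range 5).map (pvColorK g.toList c.toList 0) :=
    List.map_congr_left (fun j hj => by
      unfold pvColorK
      by_cases hpg : pvG g.toList c.toList j = true
      · rw [if_pos (by
          unfold pvG at hpg
          rw [Bool.and_eq_true, decide_eq_true_iff, beq_iff_eq] at hpg
          exact hpg), if_pos hpg]
      · rw [if_neg (fun hc => hpg (by
          unfold pvG
          rw [Bool.and_eq_true, decide_eq_true_iff, beq_iff_eq]
          exact hc)), if_neg hpg, if_neg (by rintro ⟨h, -⟩; omega)])
  rw [hmap]
  exact pv_B3 g.toList c.toList hg5 g.toList.zipIdx 0 _ rfl (by omega)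
    (fun x => by
      rw [← hmap, pv_remainingB g.toList c.toList (by omega) x]
      have : pvA g.toList c.toList 0 x = 0 := by simp [pvA]
      rw [this]
      omega)

lemma pv_wc_eq (g c : String) (hg5 : g.toList.length ≤ 5) (hcg : c.toList.length ≤ g.toList.length) :
    pvWordleCompareA g c = pvWordleCompareB g c := by
  rw [pv_wcA_eq g c hg5 hcg, pv_wcB_eq g c hg5 hcg]

def pvIsColors (k : List String) : Prop :=
  k.length = 5 ∧ ∀ s ∈ k, s = "gray" ∨ s = "yellow" ∨ s = "green"

lemma pv_wcB_colors (g c : String) (hg5 : g.toList.length ≤ 5) (hcg : c.toList.length ≤ g.toList.length) :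
    pvIsColors (pvWordleCompareB g c) := by
  rw [pv_wcB_eq g c hg5 hcg]
  constructor
  · simp
  · intro s hs
    rw [List.mem_map] at hs
    obtain ⟨j, -, hj⟩ := hs
    unfold pvColor at hj
    split_ifs at hj
    · right; right; exact hj.symm
    · right; left; exact hj.symm
    · left; exact hj.symm

lemma pv_ord_vals : pvOrderB.getD "gray" 0 = 0 ∧ pvOrderB.getD "yellow" 0 = 1 ∧ pvOrderB.getD "green" 0 = 2 := by
  decide

lemma pv_posloop_lex :
    ∀ (a b : List String), a.length = b.length →
    (∀ s ∈ a, s = "gray" ∨ s = "yellow" ∨ s = "green") →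
    (∀ s ∈ b, s = "gray" ∨ s = "yellow" ∨ s = "green") →
    (pvPosLoopA a b < 0 ↔ pvLexLtB (a.map (fun c => pvOrderB.getD c 0)) (b.map (fun c => pvOrderB.getD c 0)) = true) := by
  intro a
  induction a with
  | nil =>
    intro b hlen _ _
    have : b = [] := by
      cases b with
      | nil => rfl
      | cons y ys => simp at hlen
    subst this
    simp [pvPosLoopA, pvLexLtB]
  | cons x xs ih =>
    intro b hlen hca hcb
    cases b with
    | nil => simp at hlen
    | cons y ys =>
      have hx := hca x (by simp)
      have hy := hcb y (by simp)
      have hlen' : xs.length = ys.length := by simpa using hlen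
      have hca' : ∀ s ∈ xs, s = "gray" ∨ s = "yellow" ∨ s = "green" :=
        fun s hs => hca s (List.mem_cons_of_mem _ hs)
      have hcb' : ∀ s ∈ ys, s = "gray" ∨ s = "yellow" ∨ s = "green" :=
        fun s hs => hcb s (List.mem_cons_of_mem _ hs)
      have IH := ih ys hlen' hca' hcb'
      rcases hx with hx | hx | hx <;> rcases hy with hy | hy | hy <;> subst hx <;> subst hy <;>
        simp [pvPosLoopA, pvLexLtB, pv_ord_vals.1, pv_ord_vals.2.1, pv_ord_vals.2.2, IH]

lemma pv_cond_iff (G : PySem.Dict (List String) (List String)) (k b : List String)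
    (hk : pvIsColors k) (hb : pvIsColors b) :
    ((G.getD k []).length > (G.getD b []).length ∨
      ((G.getD k []).length = (G.getD b []).length ∧ pvCompareColorsA k b < 0))
    ↔ pvKeyLtB (pvKeyB G k) (pvKeyB G b) = true := by
  have hpos := pv_posloop_lex k b (by rw [hk.1, hb.1]) hk.2 hb.2
  unfold pvKeyB pvKeyLtB
  simp only [Bool.or_eq_true, Bool.and_eq_true, decide_eq_true_eq, beq_iff_eq]
  simp only [pvCompareColorsA]
  split_ifs with h1 h2 h3 h4
  · constructor
    · rintro (h | ⟨he, hc⟩)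
      · left; omega
      · exact absurd hc (by decide)
    · rintro (h | ⟨he, (hA | ⟨hB, -⟩)⟩)
      · left; omega
      · exact absurd hA (by omega)
      · exact absurd hB (by omega)
  · constructor
    · rintro (h | ⟨he, -⟩)
      · left; omega
      · right; exact ⟨by omega, Or.inl (by omega)⟩
    · rintro (h | ⟨he, -⟩)
      · left; omega
      · right; exact ⟨by omega, by decide⟩
  · constructor
    · rintro (h | ⟨he, hc⟩)
      · left; omega
      · exact absurd hc (by decide)
    · rintro (h | ⟨he, (hA | ⟨hB, (hC | ⟨hD, -⟩)⟩)⟩)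
      · left; omega
      · exact absurd hA (by omega)
      · exact absurd hC (by omega)
      · exact absurd hD (by omega)
  · constructor
    · rintro (h | ⟨he, -⟩)
      · left; omega
      · right; exact ⟨by omega, Or.inr ⟨by omega, Or.inl (by omega)⟩⟩
    · rintro (h | ⟨he, -⟩)
      · left; omega
      · right; exact ⟨by omega, by decide⟩
  · constructor
    · rintro (h | ⟨he, hc⟩)
      · left; omega
      · right; exact ⟨by omega, Or.inr ⟨by omega, Or.inr ⟨by omega, hpos.mp hc⟩⟩⟩
    · rintro (h | ⟨he, (hA | ⟨hB, (hC | ⟨hD, hL⟩)⟩)⟩)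
      · left; omega
      · exact absurd hA (by omega)
      · exact absurd hC (by omega)
      · right; exact ⟨by omega, hpos.mpr hL⟩

lemma pv_groups_eq (guess : String) (dict : List String)
    (hg : guess.toList.length ≤ 5) (hw : ∀ w ∈ dict, w.toList.length ≤ guess.toList.length) :
    pvWordleGroupsA guess dict
      = dict.foldl (fun d w => d.modify (pvWordleCompareB guess w) [] (· ++ [w]))
          PySem.Dict.empty := by
  unfold pvWordleGroupsA
  apply PySem.List.foldl_congr_mem
  intro d w hwmem
  dsimp only
  rw [← pv_wc_eq guess w hg (hw w hwmem)]
  cases h : d.get? (pvWordleCompareA guess w) with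
  | none =>
    simp [PySem.Dict.modify, PySem.Dict.getD_eq_get?_getD, h]
  | some l =>
    simp [PySem.Dict.modify, PySem.Dict.getD_eq_get?_getD, h]

lemma pv_keys_colors (guess : String) (dict : List String)
    (hg : guess.toList.length ≤ 5) (hw : ∀ w ∈ dict, w.toList.length ≤ guess.toList.length) :
    ∀ k ∈ (dict.foldl (fun d w => d.modify (pvWordleCompareB guess w) [] (· ++ [w]))
        (PySem.Dict.empty : PySem.Dict (List String) (List String))).keys, pvIsColors k := by
  intro k hk
  rw [PySem.Dict.keys_foldl_modify_key dict (fun w => pvWordleCompareB guess w) [] 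
      (fun _ w => (· ++ [w])) PySem.Dict.empty] at hk
  rw [PySem.Dict.keys_empty] at hk
  have hku : PySem.Set.update ([] : PySem.Set (List String)) (dict.map (fun w => pvWordleCompareB guess w))
      = PySem.Set.ofList (dict.map (fun w => pvWordleCompareB guess w)) := rfl
  rw [hku, PySem.Set.mem_ofList, List.mem_map] at hk
  obtain ⟨w, hwm, rfl⟩ := hk
  exact pv_wcB_colors guess w hg (hw w hwm)

lemma pv_sel_fold (G : PySem.Dict (List String) (List String)) :
    ∀ (l : List (List String)) (b : List String), pvIsColors b → (∀ k ∈ l, pvIsColors k) →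
    l.foldl (fun best key =>
        if (G.getD key []).length > (G.getD best []).length ∨
           ((G.getD key []).length = (G.getD best []).length ∧ pvCompareColorsA key best < 0)
        then key else best) b
    = l.foldl (fun best k => if pvKeyLtB (pvKeyB G k) (pvKeyB G best) then k else best) b := by
  intro l
  induction l with
  | nil => intro b _ _; rfl
  | cons k rest ih =>
    intro b hb hl
    simp only [List.foldl_cons]
    have hk := hl k (by simp)
    have hcond := pv_cond_iff G k b hk hb
    rw [show (if (G.getD k []).length > (G.getD b []).length ∨
           ((G.getD k []).length = (G.getD b []).length ∧ pvCompareColorsA k b < 0)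
        then k else b)
      = (if pvKeyLtB (pvKeyB G k) (pvKeyB G b) then k else b) from if_congr hcond rfl rfl]
    have hcol : pvIsColors (if pvKeyLtB (pvKeyB G k) (pvKeyB G b) then k else b) := by
      split
      · exact hk
      · exact hb
    exact ih _ hcol (fun k' hk' => hl k' (List.mem_cons_of_mem _ hk'))

lemma pv_mem_keys (guess : String) (dict : List String) (w : String) (hw : w ∈ dict) :
    pvWordleCompareB guess w ∈
      (dict.foldl (fun d w => d.modify (pvWordleCompareB guess w) [] (· ++ [w]))
        (PySem.Dict.empty : PySem.Dict (List String) (List String))).keys := by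
  rw [PySem.Dict.keys_foldl_modify_key dict (fun w => pvWordleCompareB guess w) []
      (fun _ w => (· ++ [w])) PySem.Dict.empty]
  rw [PySem.Dict.keys_empty]
  have hku : PySem.Set.update ([] : PySem.Set (List String)) (dict.map (fun w => pvWordleCompareB guess w))
      = PySem.Set.ofList (dict.map (fun w => pvWordleCompareB guess w)) := rfl
  rw [hku, PySem.Set.mem_ofList]
  exact List.mem_map_of_mem hw

theorem pv_main (guess : String) (dict : List String)
    (hg : guess.toList.length ≤ 5) (hne : dict ≠ [])
    (hw : ∀ w ∈ dict, w.toList.length ≤ guess.toList.length) :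
    absurdle_step guess dict = absurdle_step_alt guess dict := by
  unfold absurdle_step absurdle_step_alt
  dsimp only
  rw [pv_groups_eq guess dict hg hw]
  set G := dict.foldl (fun d w => d.modify (pvWordleCompareB guess w) [] (· ++ [w]))
      (PySem.Dict.empty : PySem.Dict (List String) (List String)) with hGdef
  obtain ⟨w0, ws, rfl⟩ := List.exists_cons_of_ne_nil hne
  have hkne : G.keys ≠ [] := by
    intro hnil
    have := pv_mem_keys guess (w0 :: ws) w0 (by simp)
    rw [← hGdef, hnil] at this
    simp at this
  obtain ⟨k0, rest, hkeys⟩ := List.exists_cons_of_ne_nil hkne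
  have hcolors : ∀ k ∈ G.keys, pvIsColors k := by
    intro k hk
    exact pv_keys_colors guess (w0 :: ws) hg hw k (by rw [← hGdef]; exact hk)
  rw [PySem.List.foldl_pyRange_pyGetD G.keys []
    (fun best key =>
      if (G.getD key []).length > (G.getD best []).length ∨
         ((G.getD key []).length = (G.getD best []).length ∧ pvCompareColorsA key best < 0)
      then key else best)
    (PySem.List.pyGetD G.keys 0 []) (by norm_num)]
  rw [hkeys]
  rw [PySem.List.pyGetD_ofNat']
  show (G.items, List.foldl _ ((k0 :: rest).getD 0 []) ((k0 :: rest).drop (1 : Int).toNat))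
      = (G.items, List.foldl _ k0 rest)
  have hd1 : ((k0 :: rest).drop (1 : Int).toNat) = rest := by simp
  rw [hd1, List.getD_cons_zero]
  have hsel := pv_sel_fold G rest k0
    (hcolors k0 (by rw [hkeys]; simp))
    (fun k hk => hcolors k (by rw [hkeys]; exact List.mem_cons_of_mem _ hk))
  rw [hsel]

-- ===== VERDICT (by name: the statement is the Claim_ definition above) =====
theorem absurdle_step_spec : Claim_equal_absurdle_step := by
  intro guess dict _ hpre
  unfold Spec_absurdle_step
  exact pv_main guess dict hpre.1 hpre.2.1 hpre.2.2
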